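-- pv_equiv track=rewrite | github.com/olkiszova/python_kurs_16.03.19 | 03_funkcje/zad_2.py | wiecej_niz
-- ===== SOURCE A (Python) =====
-- def wiecej_niz(tekst, prog):
--     rezultat = set()
--     liczniki_liter = {}
--     for znak in tekst:
--         liczniki_liter[znak] = liczniki_liter.get(znak, 0) + 1
--     for znak in liczniki_liter:
--         if liczniki_liter[znak] > prog:
--             rezultat.add(znak)
--
--     return rezultat
-- ===== SOURCE B (Python) =====
-- def wiecej_niz(tekst, prog):
--     rezultat = set()
--     reszta = list(tekst)
--     while reszta:
--         z = reszta[0]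
--         pozostale = [c for c in reszta if c != z]
--         if len(reszta) - len(pozostale) > prog:
--             rezultat.add(z)
--         reszta = pozostale
--     return rezultat
-- ===== Notes on version B (the rewrite author's own statement) =====
-- stated objective: alternative
-- what changed: B drops the frequency dictionary entirely: a shrinking-worklist partition repeatedly takes the first remaining character, removes all its occurrences with a filter, and derives its count as the length difference.
import Mathlib
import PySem

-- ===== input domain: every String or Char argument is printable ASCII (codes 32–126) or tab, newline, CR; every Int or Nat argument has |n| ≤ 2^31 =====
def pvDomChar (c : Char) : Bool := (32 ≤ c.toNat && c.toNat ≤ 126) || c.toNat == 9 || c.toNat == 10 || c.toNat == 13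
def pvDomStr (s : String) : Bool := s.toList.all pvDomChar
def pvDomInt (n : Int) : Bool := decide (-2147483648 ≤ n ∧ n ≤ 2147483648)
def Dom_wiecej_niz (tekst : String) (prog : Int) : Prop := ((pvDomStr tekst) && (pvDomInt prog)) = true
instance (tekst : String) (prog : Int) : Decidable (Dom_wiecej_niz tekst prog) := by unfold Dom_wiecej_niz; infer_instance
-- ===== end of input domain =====

-- B replaces A's frequency dictionary by a shrinking-worklist partition: it repeatedly takes the
-- first remaining character, removes all its occurrences, and counts them as the length difference;
-- objective: alternative (same results, no speed claim).


-- ===== PORT A =====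
-- for znak in tekst: liczniki_liter[znak] = liczniki_liter.get(znak, 0) + 1
-- then for znak in liczniki_liter: if liczniki_liter[znak] > prog: rezultat.add(znak)
-- (a character of a Python str is a 1-character str: String.ofList [z])
def wiecej_niz (tekst : String) (prog : Int) : List String :=
  let liczniki : PySem.Dict Char Int :=
    tekst.toList.foldl (fun d znak => d.insert znak (d.getD znak 0 + 1)) PySem.Dict.empty
  liczniki.keys.foldl
    (fun rezultat znak =>
      if liczniki.getD znak 0 > prog then PySem.Set.add rezultat (String.ofList [znak]) else rezultat)
    PySem.Set.empty

-- ===== PORT B =====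
-- while reszta: z = reszta[0]; pozostale = [c for c in reszta if c != z];
--   if len(reszta) - len(pozostale) > prog: rezultat.add(z); reszta = pozostale
def pvBLoop (reszta : List Char) (prog : Int) (rezultat : List String) : List String :=
  match reszta with
  | [] => rezultat
  | z :: t =>
      let pozostale := (z :: t).filter (fun c => c != z)
      pvBLoop pozostale prog
        (if ((z :: t).length : Int) - (pozostale.length : Int) > prog
         then PySem.Set.add rezultat (String.ofList [z]) else rezultat)
termination_by reszta.length
decreasing_by
  have h := List.length_filter_le (fun c => c != z) t
  simp only [pozostale, List.filter_cons, bne_self_eq_false, Bool.false_eq_true, if_false,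
    List.length_cons]
  omega

def wiecej_niz_alt (tekst : String) (prog : Int) : List String :=
  pvBLoop tekst.toList prog PySem.Set.empty

-- ===== PRECONDITION & SPEC =====
def Spec_wiecej_niz (tekst : String) (prog : Int) (out : List String) : Prop := out = wiecej_niz_alt tekst prog
instance (tekst : String) (prog : Int) (out : List String) : Decidable (Spec_wiecej_niz tekst prog out) := by unfold Spec_wiecej_niz; infer_instance

-- ===== CLAIM (what is proved, stated in full; the proofs are below) =====
def Claim_equal_wiecej_niz : Prop := ∀ (tekst : String) (prog : Int), Dom_wiecej_niz tekst prog → Spec_wiecej_niz tekst prog (wiecej_niz tekst prog)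

-- ===== LEMMAS AND PROOFS =====

-- the common canonical form both programs reach
def pvCanon (l : List Char) (prog : Int) : List String :=
  ((PySem.List.dedup l).filter (fun z => decide ((l.count z : Int) > prog))).map
    (fun z => String.ofList [z])

lemma ofList_singleton_inj {a b : Char} (h : String.ofList [a] = String.ofList [b]) : a = b := by
  have := congrArg String.toList h; simpa using this

-- A's filtering loop over a Nodup key list, landing fresh 1-char strings in the set, is filter-then-map.
lemma foldl_add_eq_filter_map (p : Char → Prop) [DecidablePred p] (l : List Char)
    (acc : List String) (hn : l.Nodup) (hd : ∀ z ∈ l, String.ofList [z] ∉ acc) :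
    l.foldl (fun s z => if p z then PySem.Set.add s (String.ofList [z]) else s) acc
      = acc ++ (l.filter (fun z => decide (p z))).map (fun z => String.ofList [z]) := by
  induction l generalizing acc with
  | nil => simp
  | cons x t ih =>
    have hx : String.ofList [x] ∉ acc := hd x (by simp)
    have hnt : t.Nodup := hn.of_cons
    have hxt : x ∉ t := by simp at hn; exact hn.1
    by_cases hp : p x
    · have hadd : PySem.Set.add acc (String.ofList [x]) = acc ++ [String.ofList [x]] := by
        simp [PySem.Set.add, PySem.Set.contains, hx]
      have hd' : ∀ z ∈ t, String.ofList [z] ∉ acc ++ [String.ofList [x]] := by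
        intro z hz
        simp only [List.mem_append, List.mem_singleton]
        rintro (h | h)
        · exact hd z (by simp [hz]) h
        · exact hxt (ofList_singleton_inj h ▸ hz)
      simp only [List.foldl_cons, if_pos hp, hadd, ih (acc ++ [String.ofList [x]]) hnt hd']
      simp [hp]
    · simp only [List.foldl_cons, if_neg hp, ih acc hnt (fun z hz => hd z (by simp [hz]))]
      simp [hp]

lemma A_eq_canon (tekst : String) (prog : Int) : wiecej_niz tekst prog = pvCanon tekst.toList prog := by
  unfold wiecej_niz pvCanon
  dsimp only
  rw [PySem.Dict.foldl_insert_getD_add_one_eq_counter]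
  have hkeys : (PySem.Dict.counter tekst.toList).keys = PySem.List.dedup tekst.toList := by
    rw [PySem.Dict.keys_counter]; simp
  rw [hkeys]
  have hcond : (PySem.List.dedup tekst.toList).foldl
      (fun s z => if (PySem.Dict.counter tekst.toList).getD z 0 > prog then
        PySem.Set.add s (String.ofList [z]) else s) PySem.Set.empty
      = (PySem.List.dedup tekst.toList).foldl
      (fun s z => if (tekst.toList.count z : Int) > prog then
        PySem.Set.add s (String.ofList [z]) else s) PySem.Set.empty := by
    apply PySem.List.foldl_congr_mem
    intro acc z _
    rw [PySem.Dict.getD_counter]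
  rw [hcond,
    foldl_add_eq_filter_map (fun z => (tekst.toList.count z : Int) > prog)
      (PySem.List.dedup tekst.toList) PySem.Set.empty (PySem.List.nodup_dedup tekst.toList)
      (by simp [PySem.Set.empty])]
  simp [PySem.Set.empty]

-- adding an element already up front commutes a cons through the dedup fold
lemma foldl_add_cons (l : List Char) (z : Char) (s : List Char) (hz : ∀ c ∈ l, c ≠ z) :
    l.foldl PySem.Set.add (z :: s) = z :: l.foldl PySem.Set.add s := by
  induction l generalizing s with
  | nil => rfl
  | cons x t ih =>
    have hx : x ≠ z := hz x (by simp)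
    have hcont : PySem.Set.contains (z :: s) x = PySem.Set.contains s x := by
      simp [PySem.Set.contains, hx]
    have hadd : PySem.Set.add (z :: s) x = z :: PySem.Set.add s x := by
      by_cases h : x ∈ s <;> simp [PySem.Set.add, PySem.Set.contains, hx, h]
    simp only [List.foldl_cons, hadd, ih _ (fun c hc => hz c (by simp [hc]))]

-- an element already present is skipped by the dedup fold
lemma foldl_add_filter (l : List Char) (z : Char) (s : List Char)
    (hz : z ∈ s) : l.foldl PySem.Set.add s = (l.filter (fun c => c != z)).foldl PySem.Set.add s := by
  induction l generalizing s with
  | nil => rfl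
  | cons x t ih =>
    by_cases hx : x = z
    · subst hx
      have : PySem.Set.add s x = s := by
        simp [PySem.Set.add, PySem.Set.contains, List.elem_eq_contains, hz]
      simp only [List.filter_cons, bne_self_eq_false, List.foldl_cons, this]
      exact ih s hz
    · have hmem : z ∈ PySem.Set.add s x := by
        by_cases h : x ∈ s <;> simp [PySem.Set.add, PySem.Set.contains, h, hz]
      simp only [List.filter_cons, List.foldl_cons]
      rw [if_pos (by simpa using hx)]
      simpa using ih (PySem.Set.add s x) hmem

-- dedup of a cons: head, then dedup of the tail with the head removed
lemma dedup_cons (z : Char) (t : List Char) :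
    PySem.List.dedup (z :: t) = z :: PySem.List.dedup (t.filter (fun c => c != z)) := by
  have h1 : PySem.List.dedup (z :: t) = t.foldl PySem.Set.add [z] := by
    simp [PySem.List.dedup_eq_ofList, PySem.Set.ofList_eq_foldl, PySem.Set.add,
      PySem.Set.contains, PySem.Set.empty]
  rw [h1, foldl_add_filter t z [z] (by simp)]
  rw [foldl_add_cons _ z [] (fun c hc => by simpa using (List.of_mem_filter hc))]
  simp [PySem.List.dedup_eq_ofList, PySem.Set.ofList_eq_foldl, PySem.Set.empty]

lemma count_filter_ne (t : List Char) (z c : Char) (hc : c ≠ z) :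
    (t.filter (fun x => x != z)).count c = t.count c := by
  induction t with
  | nil => rfl
  | cons x t ih =>
    by_cases hx : x = z
    · subst hx
      simp only [List.filter_cons, bne_self_eq_false, Bool.false_eq_true, if_false,
        List.count_cons]
      rw [ih]
      simp [Ne.symm hc]
    · simp only [List.filter_cons]
      rw [if_pos (by simpa using hx)]
      simp [List.count_cons, ih]

lemma length_filter_count (t : List Char) (z : Char) :
    t.length = (t.filter (fun x => x != z)).length + t.count z := by
  induction t with
  | nil => rfl
  | cons x t ih =>
    by_cases hx : x = z
    · subst hx
      simp only [List.length_cons, List.filter_cons, bne_self_eq_false, Bool.false_eq_true,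
        if_false, List.count_cons, beq_self_eq_true, if_true]
      omega
    · simp only [List.filter_cons, List.count_cons]
      rw [if_pos (by simpa using hx)]
      simp only [List.length_cons]
      have : (if (x == z) = true then 1 else 0) = 0 := by simp [hx]
      omega

-- B's worklist loop computes the canonical form
lemma bLoop_eq (n : Nat) : ∀ (l : List Char), l.length ≤ n → ∀ (prog : Int) (acc : List String),
    (∀ z ∈ l, String.ofList [z] ∉ acc) →
    pvBLoop l prog acc = acc ++ pvCanon l prog := by
  induction n with
  | zero =>
    intro l hl prog acc _
    have : l = [] := List.eq_nil_of_length_eq_zero (Nat.le_zero.mp hl)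
    subst this
    rw [pvBLoop]
    simp [pvCanon, PySem.List.dedup]
  | succ n ih =>
    intro l hl prog acc hfresh
    match l with
    | [] =>
      rw [pvBLoop]
      simp [pvCanon, PySem.List.dedup]
    | z :: t =>
      rw [pvBLoop]
      simp only [List.filter_cons, bne_self_eq_false, Bool.false_eq_true, if_false]
      set poz := t.filter (fun c => c != z) with hpoz
      have hlen : poz.length ≤ n := by
        have h2 := List.length_filter_le (fun c => c != z) t
        rw [← hpoz] at h2
        simp only [List.length_cons] at hl
        omega
      have hcnt : ((z :: t).length : Int) - (poz.length : Int) = ((z :: t).count z : Int) := by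
        have h3 := length_filter_count t z
        rw [← hpoz] at h3
        simp only [List.length_cons, List.count_cons, beq_self_eq_true, if_true]
        push_cast
        omega
      rw [hcnt]
      set acc' := (if ((z :: t).count z : Int) > prog
          then PySem.Set.add acc (String.ofList [z]) else acc) with hacc'
      have hzacc : String.ofList [z] ∉ acc := hfresh z (by simp)
      have hcount1 : ((z :: t).count z : Int) = (t.count z : Int) + 1 := by
        simp [List.count_cons]
      have hacc'cases : acc' = acc ++ (if ((z :: t).count z : Int) > prog
          then [String.ofList [z]] else []) := by
        by_cases h : ((z :: t).count z : Int) > prog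
        · have hc : prog ≤ (t.count z : Int) := by rw [hcount1] at h; omega
          simp [hacc', PySem.Set.add, PySem.Set.contains, hzacc, hc]
        · have hc : ¬ prog ≤ (t.count z : Int) := by rw [hcount1] at h; omega
          simp [hacc', hc]
      have hfresh' : ∀ c ∈ poz, String.ofList [c] ∉ acc' := by
        intro c hc
        have hcne : c ≠ z := by simpa using (List.of_mem_filter hc)
        have hct : c ∈ t := List.mem_of_mem_filter hc
        rw [hacc'cases]
        simp only [List.mem_append]
        rintro (h | h)
        · exact hfresh c (by simp [hct]) h
        · split at h
          · simp only [List.mem_singleton] at h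
            exact hcne (ofList_singleton_inj h)
          · simp at h
      rw [ih poz hlen prog acc' hfresh']
      rw [hacc'cases]
      unfold pvCanon
      rw [dedup_cons, ← hpoz]
      simp only [List.filter_cons, List.map_cons, List.append_assoc]
      congr 1
      have hcounts : (PySem.List.dedup poz).filter
            (fun c => decide ((poz.count c : Int) > prog))
          = (PySem.List.dedup poz).filter
            (fun c => decide (((z :: t).count c : Int) > prog)) := by
        apply List.filter_congr
        intro c hc
        have hcne : c ≠ z := by
          have := (PySem.List.mem_dedup _ _).mp hc
          simpa using (List.of_mem_filter this)
        rw [hpoz, count_filter_ne t z c hcne]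
        simp [List.count_cons, Ne.symm hcne]
      rw [hcounts]
      by_cases hc : prog ≤ (t.count z : Int) <;> simp [hc]

-- ===== VERDICT (by name: the statement is the Claim_ definition above) =====
theorem wiecej_niz_spec : Claim_equal_wiecej_niz := by
  intro tekst prog _
  unfold Spec_wiecej_niz wiecej_niz_alt
  rw [A_eq_canon,
    bLoop_eq tekst.toList.length tekst.toList le_rfl prog PySem.Set.empty
      (by simp [PySem.Set.empty])]
  simp [PySem.Set.empty]
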